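-- pv_equiv track=rewrite | github.com/jaahnavi/ranking_kaggle_datasets- | Resume_gap_extractor.py | _group_skills
-- ===== SOURCE A (Python) =====
-- def _group_skills(skills: list) -> dict:
--     """Bucket missing skills into readable categories."""
--     buckets = {
--         "cloud/infrastructure": [],
--         "ML frameworks":        [],
--         "data engineering":     [],
--         "analytics/BI":         [],
--         "other":                [],
--     }
--     cloud = {"aws", "azure", "gcp", "snowflake", "redshift", "bigquery",
--              "synapse", "fabric", "s3", "lambda", "glue"}
--     ml    = {"tensorflow", "pytorch", "scikit-learn", "xgboost", "deep learning",
--              "machine learning", "nlp", "classification", "regression",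
--              "forecasting", "time series", "a/b testing", "feature engineering",
--              "clustering", "hypothesis testing"}
--     de    = {"spark", "kafka", "airflow", "dbt", "etl", "elt", "fivetran",
--              "data pipeline", "data warehouse", "data lake", "mlops",
--              "data modeling", "star schema", "dimensional modeling"}
--     bi    = {"power bi", "tableau", "looker", "data visualization", "dashboard",
--              "reporting", "business intelligence", "kpi"}
--
--     for s in skills:
--         if s in cloud:
--             buckets["cloud/infrastructure"].append(s)
--         elif s in ml:
--             buckets["ML frameworks"].append(s)
--         elif s in de:
--             buckets["data engineering"].append(s)
--         elif s in bi:
--             buckets["analytics/BI"].append(s)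
--         else:
--             buckets["other"].append(s)
--
--     return {k: v for k, v in buckets.items() if v}
-- ===== SOURCE B (Python) =====
-- _CATEGORIES = [
--     ("cloud/infrastructure", frozenset({"aws", "azure", "gcp", "snowflake", "redshift",
--                                         "bigquery", "synapse", "fabric", "s3", "lambda", "glue"})),
--     ("ML frameworks",        frozenset({"tensorflow", "pytorch", "scikit-learn", "xgboost",
--                                         "deep learning", "machine learning", "nlp", "classification",
--                                         "regression", "forecasting", "time series", "a/b testing",
--                                         "feature engineering", "clustering", "hypothesis testing"})),
--     ("data engineering",     frozenset({"spark", "kafka", "airflow", "dbt", "etl", "elt", "fivetran",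
--                                         "data pipeline", "data warehouse", "data lake", "mlops",
--                                         "data modeling", "star schema", "dimensional modeling"})),
--     ("analytics/BI",         frozenset({"power bi", "tableau", "looker", "data visualization",
--                                         "dashboard", "reporting", "business intelligence", "kpi"})),
-- ]
-- _KNOWN = frozenset().union(*(members for _, members in _CATEGORIES))
--
--
-- def _group_skills(skills: list) -> dict:
--     """Bucket missing skills into readable categories."""
--     # Staged sweeps: one filter pass per category (the sets are disjoint, so
--     # a plain membership filter equals A's elif precedence), then one pass
--     # for the leftovers; empty groups are dropped by the final comprehension.
--     groups = [(name, [s for s in skills if s in members]) for name, members in _CATEGORIES]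
--     groups.append(("other", [s for s in skills if s not in _KNOWN]))
--     return {name: hit for name, hit in groups if hit}
-- ===== Notes on version B (the rewrite author's own statement) =====
-- stated objective: alternative
-- what changed: Replaces A's single dispatch loop with an elif cascade by staged filter passes: one list-comprehension sweep per category from a category table (valid because the four sets are disjoint), one sweep for leftovers, then a comprehension dropping empty groups.
import Mathlib
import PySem

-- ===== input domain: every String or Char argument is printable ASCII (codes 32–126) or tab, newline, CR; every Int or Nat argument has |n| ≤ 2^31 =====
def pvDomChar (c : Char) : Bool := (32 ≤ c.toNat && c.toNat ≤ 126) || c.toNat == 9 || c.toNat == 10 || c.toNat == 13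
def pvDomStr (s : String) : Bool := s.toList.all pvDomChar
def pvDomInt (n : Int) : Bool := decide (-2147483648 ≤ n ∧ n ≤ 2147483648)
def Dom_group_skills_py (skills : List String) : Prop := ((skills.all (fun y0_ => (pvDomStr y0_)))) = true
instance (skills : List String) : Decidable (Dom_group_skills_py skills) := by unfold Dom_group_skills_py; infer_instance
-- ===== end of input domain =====

-- B replaces A's single dispatch loop (elif cascade per skill) by one filter sweep per
-- category plus a leftovers sweep (alternative decomposition; same behaviour).

-- ===== PORT A =====
def pvCloud : PySem.Set String := PySem.Set.ofList ["aws", "azure", "gcp", "snowflake", "redshift", "bigquery", "synapse", "fabric", "s3", "lambda", "glue"]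
def pvMl : PySem.Set String := PySem.Set.ofList ["tensorflow", "pytorch", "scikit-learn", "xgboost", "deep learning", "machine learning", "nlp", "classification", "regression", "forecasting", "time series", "a/b testing", "feature engineering", "clustering", "hypothesis testing"]
def pvDe : PySem.Set String := PySem.Set.ofList ["spark", "kafka", "airflow", "dbt", "etl", "elt", "fivetran", "data pipeline", "data warehouse", "data lake", "mlops", "data modeling", "star schema", "dimensional modeling"]
def pvBi : PySem.Set String := PySem.Set.ofList ["power bi", "tableau", "looker", "data visualization", "dashboard", "reporting", "business intelligence", "kpi"]

def group_skills_py (skills : List String) : List (String × List String) :=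
  let buckets : PySem.Dict String (List String) :=
    PySem.Dict.ofList [("cloud/infrastructure", []), ("ML frameworks", []),
                       ("data engineering", []), ("analytics/BI", []), ("other", [])]
  let buckets := skills.foldl (fun b s =>
    if PySem.Set.contains pvCloud s then b.modify "cloud/infrastructure" [] (· ++ [s])
    else if PySem.Set.contains pvMl s then b.modify "ML frameworks" [] (· ++ [s])
    else if PySem.Set.contains pvDe s then b.modify "data engineering" [] (· ++ [s])
    else if PySem.Set.contains pvBi s then b.modify "analytics/BI" [] (· ++ [s])
    else b.modify "other" [] (· ++ [s])) buckets
  buckets.items.filter (fun kv => !kv.2.isEmpty)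

-- ===== PORT B =====
def pvCategories : List (String × PySem.Set String) :=
  [("cloud/infrastructure", PySem.Set.ofList ["aws", "azure", "gcp", "snowflake", "redshift", "bigquery", "synapse", "fabric", "s3", "lambda", "glue"]),
   ("ML frameworks", PySem.Set.ofList ["tensorflow", "pytorch", "scikit-learn", "xgboost", "deep learning", "machine learning", "nlp", "classification", "regression", "forecasting", "time series", "a/b testing", "feature engineering", "clustering", "hypothesis testing"]),
   ("data engineering", PySem.Set.ofList ["spark", "kafka", "airflow", "dbt", "etl", "elt", "fivetran", "data pipeline", "data warehouse", "data lake", "mlops", "data modeling", "star schema", "dimensional modeling"]),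
   ("analytics/BI", PySem.Set.ofList ["power bi", "tableau", "looker", "data visualization", "dashboard", "reporting", "business intelligence", "kpi"])]

-- frozenset().union(*members): the distinct elements of all four member sets
def pvKnown : PySem.Set String :=
  pvCategories.foldl (fun k p => PySem.Set.update k p.2) (PySem.Set.ofList [])

def group_skills_py_alt (skills : List String) : List (String × List String) :=
  let groups := pvCategories.map (fun p => (p.1, skills.filter (fun s => PySem.Set.contains p.2 s)))
  let groups := groups ++ [("other", skills.filter (fun s => !(PySem.Set.contains pvKnown s)))]
  groups.filter (fun kv => !kv.2.isEmpty)

-- ===== PRECONDITION & SPEC =====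
def Spec_group_skills_py (skills : List String) (out : List (String × List String)) : Prop := out = group_skills_py_alt skills
instance (skills : List String) (out : List (String × List String)) : Decidable (Spec_group_skills_py skills out) := by unfold Spec_group_skills_py; infer_instance

-- ===== CLAIM (what is proved, stated in full; the proofs are below) =====
def Claim_equal_group_skills_py : Prop := ∀ (skills : List String), Dom_group_skills_py skills → Spec_group_skills_py skills (group_skills_py skills)

-- ===== LEMMAS AND PROOFS =====

-- A's chain conditions, per bucket
def pvC1 (s : String) : Bool := PySem.Set.contains pvCloud s
def pvC2 (s : String) : Bool := !pvC1 s && PySem.Set.contains pvMl s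
def pvC3 (s : String) : Bool := !pvC1 s && !PySem.Set.contains pvMl s && PySem.Set.contains pvDe s
def pvC4 (s : String) : Bool := !pvC1 s && !PySem.Set.contains pvMl s && !PySem.Set.contains pvDe s && PySem.Set.contains pvBi s
def pvC5 (s : String) : Bool := !pvC1 s && !PySem.Set.contains pvMl s && !PySem.Set.contains pvDe s && !PySem.Set.contains pvBi s

def pvMk (v1 v2 v3 v4 v5 : List String) : PySem.Dict String (List String) :=
  PySem.Dict.mk [("cloud/infrastructure", v1), ("ML frameworks", v2),
                 ("data engineering", v3), ("analytics/BI", v4), ("other", v5)]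

lemma pv_mod1 (v1 v2 v3 v4 v5 : List String) (s : String) :
    (pvMk v1 v2 v3 v4 v5).modify "cloud/infrastructure" [] (· ++ [s]) = pvMk (v1 ++ [s]) v2 v3 v4 v5 := rfl
lemma pv_mod2 (v1 v2 v3 v4 v5 : List String) (s : String) :
    (pvMk v1 v2 v3 v4 v5).modify "ML frameworks" [] (· ++ [s]) = pvMk v1 (v2 ++ [s]) v3 v4 v5 := rfl
lemma pv_mod3 (v1 v2 v3 v4 v5 : List String) (s : String) :
    (pvMk v1 v2 v3 v4 v5).modify "data engineering" [] (· ++ [s]) = pvMk v1 v2 (v3 ++ [s]) v4 v5 := rfl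
lemma pv_mod4 (v1 v2 v3 v4 v5 : List String) (s : String) :
    (pvMk v1 v2 v3 v4 v5).modify "analytics/BI" [] (· ++ [s]) = pvMk v1 v2 v3 (v4 ++ [s]) v5 := rfl
lemma pv_mod5 (v1 v2 v3 v4 v5 : List String) (s : String) :
    (pvMk v1 v2 v3 v4 v5).modify "other" [] (· ++ [s]) = pvMk v1 v2 v3 v4 (v5 ++ [s]) := rfl

def pvStep (b : PySem.Dict String (List String)) (s : String) : PySem.Dict String (List String) :=
  if PySem.Set.contains pvCloud s then b.modify "cloud/infrastructure" [] (· ++ [s])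
  else if PySem.Set.contains pvMl s then b.modify "ML frameworks" [] (· ++ [s])
  else if PySem.Set.contains pvDe s then b.modify "data engineering" [] (· ++ [s])
  else if PySem.Set.contains pvBi s then b.modify "analytics/BI" [] (· ++ [s])
  else b.modify "other" [] (· ++ [s])

lemma pvStep_mk (v1 v2 v3 v4 v5 : List String) (s : String) :
    pvStep (pvMk v1 v2 v3 v4 v5) s =
      pvMk (if pvC1 s then v1 ++ [s] else v1) (if pvC2 s then v2 ++ [s] else v2)
           (if pvC3 s then v3 ++ [s] else v3) (if pvC4 s then v4 ++ [s] else v4)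
           (if pvC5 s then v5 ++ [s] else v5) := by
  unfold pvStep
  split_ifs with h1 h2 h3 h4 <;>
    simp_all [pvC1, pvC2, pvC3, pvC4, pvC5, pv_mod1, pv_mod2, pv_mod3, pv_mod4, pv_mod5]

lemma pv_fold_eq (skills : List String) :
    ∀ v1 v2 v3 v4 v5 : List String,
    skills.foldl pvStep (pvMk v1 v2 v3 v4 v5) =
      pvMk (v1 ++ skills.filter pvC1) (v2 ++ skills.filter pvC2) (v3 ++ skills.filter pvC3)
           (v4 ++ skills.filter pvC4) (v5 ++ skills.filter pvC5) := by
  induction skills with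
  | nil => intro v1 v2 v3 v4 v5; simp [List.filter]
  | cons s rest ih =>
    intro v1 v2 v3 v4 v5
    simp only [List.foldl_cons, pvStep_mk, ih, List.filter_cons]
    split_ifs <;> simp

-- chain condition = plain membership in that category's set (the four sets are disjoint)
lemma pv_c2_eq (s : String) : pvC2 s = PySem.Set.contains pvMl s := by
  by_cases h : s ∈ (["tensorflow", "pytorch", "scikit-learn", "xgboost", "deep learning", "machine learning", "nlp", "classification", "regression", "forecasting", "time series", "a/b testing", "feature engineering", "clustering", "hypothesis testing"] : List String)
  · fin_cases h <;> decide
  · have hc : PySem.Set.contains pvMl s = false := by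
      rw [PySem.Set.contains_eq_listContains, show (pvMl : List String) = ["tensorflow", "pytorch", "scikit-learn", "xgboost", "deep learning", "machine learning", "nlp", "classification", "regression", "forecasting", "time series", "a/b testing", "feature engineering", "clustering", "hypothesis testing"] from by decide]
      simpa using h
    simp only [pvC2, hc, Bool.and_false]

lemma pv_c3_eq (s : String) : pvC3 s = PySem.Set.contains pvDe s := by
  by_cases h : s ∈ (["spark", "kafka", "airflow", "dbt", "etl", "elt", "fivetran", "data pipeline", "data warehouse", "data lake", "mlops", "data modeling", "star schema", "dimensional modeling"] : List String)
  · fin_cases h <;> decide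
  · have hc : PySem.Set.contains pvDe s = false := by
      rw [PySem.Set.contains_eq_listContains, show (pvDe : List String) = ["spark", "kafka", "airflow", "dbt", "etl", "elt", "fivetran", "data pipeline", "data warehouse", "data lake", "mlops", "data modeling", "star schema", "dimensional modeling"] from by decide]
      simpa using h
    simp only [pvC3, hc, Bool.and_false]

lemma pv_c4_eq (s : String) : pvC4 s = PySem.Set.contains pvBi s := by
  by_cases h : s ∈ (["power bi", "tableau", "looker", "data visualization", "dashboard", "reporting", "business intelligence", "kpi"] : List String)
  · fin_cases h <;> decide
  · have hc : PySem.Set.contains pvBi s = false := by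
      rw [PySem.Set.contains_eq_listContains, show (pvBi : List String) = ["power bi", "tableau", "looker", "data visualization", "dashboard", "reporting", "business intelligence", "kpi"] from by decide]
      simpa using h
    simp only [pvC4, hc, Bool.and_false]

set_option maxRecDepth 40000 in
lemma pv_c5_eq (s : String) : pvC5 s = !(PySem.Set.contains pvKnown s) := by
  by_cases h : s ∈ ((["aws", "azure", "gcp", "snowflake", "redshift", "bigquery", "synapse", "fabric", "s3", "lambda", "glue"] : List String) ++ ["tensorflow", "pytorch", "scikit-learn", "xgboost", "deep learning", "machine learning", "nlp", "classification", "regression", "forecasting", "time series", "a/b testing", "feature engineering", "clustering", "hypothesis testing"] ++ ["spark", "kafka", "airflow", "dbt", "etl", "elt", "fivetran", "data pipeline", "data warehouse", "data lake", "mlops", "data modeling", "star schema", "dimensional modeling"] ++ ["power bi", "tableau", "looker", "data visualization", "dashboard", "reporting", "business intelligence", "kpi"])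
  · have h' : s ∈ (["aws", "azure", "gcp", "snowflake", "redshift", "bigquery", "synapse", "fabric", "s3", "lambda", "glue", "tensorflow", "pytorch", "scikit-learn", "xgboost", "deep learning", "machine learning", "nlp", "classification", "regression", "forecasting", "time series", "a/b testing", "feature engineering", "clustering", "hypothesis testing", "spark", "kafka", "airflow", "dbt", "etl", "elt", "fivetran", "data pipeline", "data warehouse", "data lake", "mlops", "data modeling", "star schema", "dimensional modeling", "power bi", "tableau", "looker", "data visualization", "dashboard", "reporting", "business intelligence", "kpi"] : List String) := by simpa using h
    fin_cases h' <;> decide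
  · simp only [List.mem_append, not_or] at h
    obtain ⟨⟨⟨hn1, hn2⟩, hn3⟩, hn4⟩ := h
    have hk : PySem.Set.contains pvKnown s = false := by
      rw [PySem.Set.contains_eq_listContains,
          show (pvKnown : List String) = (["aws", "azure", "gcp", "snowflake", "redshift", "bigquery", "synapse", "fabric", "s3", "lambda", "glue"] : List String) ++ ["tensorflow", "pytorch", "scikit-learn", "xgboost", "deep learning", "machine learning", "nlp", "classification", "regression", "forecasting", "time series", "a/b testing", "feature engineering", "clustering", "hypothesis testing"] ++ ["spark", "kafka", "airflow", "dbt", "etl", "elt", "fivetran", "data pipeline", "data warehouse", "data lake", "mlops", "data modeling", "star schema", "dimensional modeling"] ++ ["power bi", "tableau", "looker", "data visualization", "dashboard", "reporting", "business intelligence", "kpi"] from by decide]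
      simp only [List.contains_eq_mem, decide_eq_false_iff_not, List.mem_append, not_or]
      exact ⟨⟨⟨hn1, hn2⟩, hn3⟩, hn4⟩
    have h1 : PySem.Set.contains pvCloud s = false := by
      rw [PySem.Set.contains_eq_listContains, show (pvCloud : List String) = ["aws", "azure", "gcp", "snowflake", "redshift", "bigquery", "synapse", "fabric", "s3", "lambda", "glue"] from by decide]
      simpa using hn1
    have h2 : PySem.Set.contains pvMl s = false := by
      rw [PySem.Set.contains_eq_listContains, show (pvMl : List String) = ["tensorflow", "pytorch", "scikit-learn", "xgboost", "deep learning", "machine learning", "nlp", "classification", "regression", "forecasting", "time series", "a/b testing", "feature engineering", "clustering", "hypothesis testing"] from by decide]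
      simpa using hn2
    have h3 : PySem.Set.contains pvDe s = false := by
      rw [PySem.Set.contains_eq_listContains, show (pvDe : List String) = ["spark", "kafka", "airflow", "dbt", "etl", "elt", "fivetran", "data pipeline", "data warehouse", "data lake", "mlops", "data modeling", "star schema", "dimensional modeling"] from by decide]
      simpa using hn3
    have h4 : PySem.Set.contains pvBi s = false := by
      rw [PySem.Set.contains_eq_listContains, show (pvBi : List String) = ["power bi", "tableau", "looker", "data visualization", "dashboard", "reporting", "business intelligence", "kpi"] from by decide]
      simpa using hn4
    simp only [pvC5, pvC1, h1, h2, h3, h4, hk]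
    rfl

-- ===== VERDICT (by name: the statement is the Claim_ definition above) =====
theorem group_skills_py_spec : Claim_equal_group_skills_py := by
  intro skills _
  unfold Spec_group_skills_py group_skills_py group_skills_py_alt
  have hfold := pv_fold_eq skills [] [] [] [] []
  simp only [List.nil_append] at hfold
  show (skills.foldl pvStep (pvMk [] [] [] [] [])).items.filter (fun kv => !kv.2.isEmpty) = _
  rw [hfold]
  simp only [pvMk, pvCategories, List.map_cons, List.map_nil, List.filter_cons,
    List.nil_append, List.cons_append]
  rw [List.filter_congr (fun s _ => pv_c2_eq s), List.filter_congr (fun s _ => pv_c3_eq s),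
      List.filter_congr (fun s _ => pv_c4_eq s), List.filter_congr (fun s _ => pv_c5_eq s)]
  rfl
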